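-- pv_equiv track=rewrite | github.com/Aryudesu/ABC | ABC/239/C.py | calc
-- ===== SOURCE A (Python) =====
-- def calc(x1, y1, x2, y2):
--     point = set()
--     point.add((-2, 1))
--     point.add((-2, -1))
--     point.add((-1, -2))
--     point.add((-1, 2))
--     point.add((1, 2))
--     point.add((1, -2))
--     point.add((2, 1))
--     point.add((2, -1))
--     for p in point:
--         x, y = p
--         tmp = (x2 - x1 - x, y2 - y1 - y)
--         if tmp in point:
--             return True
--     return False
-- ===== SOURCE B (Python) =====
-- _MOVES = [(-2, 1), (-2, -1), (-1, -2), (-1, 2), (1, 2), (1, -2), (2, 1), (2, -1)]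
-- _TWO = {(a + c, b + d) for a, b in _MOVES for c, d in _MOVES}
--
--
-- def calc(x1, y1, x2, y2):
--     return (x2 - x1, y2 - y1) in _TWO
-- ===== Notes on version B (the rewrite author's own statement) =====
-- stated objective: simpler
-- what changed: B precomputes once, at module level, the set of all 33 displacements reachable in exactly two knight moves and reduces the function body to a single membership test, replacing A's per-call loop over the 8 moves with a second membership test inside.
import Mathlib
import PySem

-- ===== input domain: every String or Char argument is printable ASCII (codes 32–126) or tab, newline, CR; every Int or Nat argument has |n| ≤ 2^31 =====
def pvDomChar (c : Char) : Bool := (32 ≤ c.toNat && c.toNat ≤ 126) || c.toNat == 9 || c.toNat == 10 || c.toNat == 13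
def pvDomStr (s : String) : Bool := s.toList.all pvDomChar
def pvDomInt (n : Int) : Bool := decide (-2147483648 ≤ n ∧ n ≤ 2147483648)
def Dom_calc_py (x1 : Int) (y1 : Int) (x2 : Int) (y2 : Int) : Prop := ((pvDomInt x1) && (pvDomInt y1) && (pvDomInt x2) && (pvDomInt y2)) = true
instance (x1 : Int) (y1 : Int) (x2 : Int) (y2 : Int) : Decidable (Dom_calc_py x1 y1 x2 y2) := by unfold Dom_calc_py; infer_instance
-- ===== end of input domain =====

-- B replaces A's per-call scan over the 8 knight moves by a module-level precomputed set of all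
-- two-move displacement sums and a single membership test (objective: simpler).


-- ===== PORT A =====
-- the 8 knight moves, built exactly as A builds its set (add after add on an empty set)
def pointA : PySem.Set (Int × Int) :=
  ((((((((PySem.Set.empty).add ((-2 : Int), (1 : Int))).add ((-2 : Int), (-1 : Int))).add
      ((-1 : Int), (-2 : Int))).add ((-1 : Int), (2 : Int))).add ((1 : Int), (2 : Int))).add
      ((1 : Int), (-2 : Int))).add ((2 : Int), (1 : Int))).add ((2 : Int), (-1 : Int))

-- the for-loop with early return: first p whose tmp is in the set → True, else False
def calcLoopA (x1 y1 x2 y2 : Int) : List (Int × Int) → Bool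
  | [] => false
  | p :: rest =>
      if pointA.contains (x2 - x1 - p.1, y2 - y1 - p.2) then true
      else calcLoopA x1 y1 x2 y2 rest

def calc_py (x1 : Int) (y1 : Int) (x2 : Int) (y2 : Int) : Bool :=
  calcLoopA x1 y1 x2 y2 pointA

-- ===== PORT B =====
-- B: module-level constants — the 8 moves and the precomputed set of all two-move sums
def movesB : List (Int × Int) :=
  [(-2, 1), (-2, -1), (-1, -2), (-1, 2), (1, 2), (1, -2), (2, 1), (2, -1)]

def twoB : PySem.Set (Int × Int) :=
  PySem.Set.ofList (movesB.flatMap (fun a => movesB.map (fun c => (a.1 + c.1, a.2 + c.2))))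

def calc_py_alt (x1 : Int) (y1 : Int) (x2 : Int) (y2 : Int) : Bool :=
  twoB.contains (x2 - x1, y2 - y1)

-- ===== PRECONDITION & SPEC =====
def Spec_calc_py (x1 : Int) (y1 : Int) (x2 : Int) (y2 : Int) (out : Bool) : Prop := out = calc_py_alt x1 y1 x2 y2
instance (x1 : Int) (y1 : Int) (x2 : Int) (y2 : Int) (out : Bool) : Decidable (Spec_calc_py x1 y1 x2 y2 out) := by unfold Spec_calc_py; infer_instance

-- ===== CLAIM (what is proved, stated in full; the proofs are below) =====
def Claim_equal_calc_py : Prop := ∀ (x1 : Int) (y1 : Int) (x2 : Int) (y2 : Int), Dom_calc_py x1 y1 x2 y2 → Spec_calc_py x1 y1 x2 y2 (calc_py x1 y1 x2 y2)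

-- ===== LEMMAS AND PROOFS =====

-- evaluated forms of the two module-level set constants (closed terms, checked by decide)
theorem pointA_eval : pointA = [(-2, 1), (-2, -1), (-1, -2), (-1, 2), (1, 2), (1, -2), (2, 1), (2, -1)] := by decide

set_option maxRecDepth 4096 in
theorem twoB_eval : twoB = [(-4, 2), (-4, 0), (-3, -1), (-3, 3), (-1, 3), (-1, -1), (0, 2), (0, 0), (-4, -2), (-3, -3), (-3, 1), (-1, 1), (-1, -3), (0, -2), (-2, -4), (-2, 0), (0, -4), (1, -1), (1, -3), (-2, 4), (0, 4), (1, 3), (1, 1), (2, 4), (2, 0), (3, 3), (3, 1), (2, -4), (3, -1), (3, -3), (4, 2), (4, 0), (4, -2)] := by decide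

-- the loop's result depends on the inputs only through the differences x2-x1 and y2-y1
theorem calcLoopA_shift (x1 y1 x2 y2 : Int) (l : List (Int × Int)) :
    calcLoopA x1 y1 x2 y2 l = calcLoopA 0 0 (x2 - x1) (y2 - y1) l := by
  induction l with
  | nil => rfl
  | cons p rest ih =>
      simp only [calcLoopA, ih]
      norm_num

-- outside the 9×9 box around the start both programs answer false
theorem calc_py_box (dx dy : Int) (h : ¬(-4 ≤ dx ∧ dx ≤ 4 ∧ -4 ≤ dy ∧ dy ≤ 4)) :
    calc_py 0 0 dx dy = false := by
  rw [Bool.eq_false_iff]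
  intro ht
  simp only [calc_py, pointA_eval, calcLoopA, PySem.Set.contains,
    List.contains_eq_mem, List.mem_cons, List.not_mem_nil, decide_eq_true_eq,
    Bool.if_true_left, Bool.or_eq_true, Bool.false_eq_true, or_false, Prod.ext_iff] at ht
  rcases ht with ht | ht | ht | ht | ht | ht | ht | ht
  all_goals omega

theorem calc_py_alt_box (dx dy : Int) (h : ¬(-4 ≤ dx ∧ dx ≤ 4 ∧ -4 ≤ dy ∧ dy ≤ 4)) :
    calc_py_alt 0 0 dx dy = false := by
  rw [Bool.eq_false_iff]
  intro ht
  simp only [calc_py_alt, twoB_eval, PySem.Set.contains, List.contains_eq_mem, List.mem_cons,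
    List.not_mem_nil, or_false, decide_eq_true_eq, Prod.ext_iff] at ht
  rcases ht with ht | ht | ht | ht | ht | ht | ht | ht | ht | ht | ht | ht | ht | ht | ht | ht | ht | ht | ht | ht | ht | ht | ht | ht | ht | ht | ht | ht | ht | ht | ht | ht | ht <;> omega

-- inside the box, a finite check
set_option maxRecDepth 8192 in
theorem calc_py_inbox (dx dy : Int) (h1 : -4 ≤ dx) (h2 : dx ≤ 4) (h3 : -4 ≤ dy) (h4 : dy ≤ 4) :
    calc_py 0 0 dx dy = calc_py_alt 0 0 dx dy := by
  interval_cases dx <;> interval_cases dy <;> decide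

-- ===== VERDICT (by name: the statement is the Claim_ definition above) =====
theorem calc_py_spec : Claim_equal_calc_py := by
  intro x1 y1 x2 y2 _
  unfold Spec_calc_py
  have ha : calc_py x1 y1 x2 y2 = calc_py 0 0 (x2 - x1) (y2 - y1) := by
    unfold calc_py
    exact calcLoopA_shift x1 y1 x2 y2 pointA
  have hb : calc_py_alt x1 y1 x2 y2 = calc_py_alt 0 0 (x2 - x1) (y2 - y1) := by
    unfold calc_py_alt
    norm_num
  rw [ha, hb]
  by_cases hbox : -4 ≤ x2 - x1 ∧ x2 - x1 ≤ 4 ∧ -4 ≤ y2 - y1 ∧ y2 - y1 ≤ 4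
  · exact calc_py_inbox _ _ hbox.1 hbox.2.1 hbox.2.2.1 hbox.2.2.2
  · rw [calc_py_box _ _ hbox, calc_py_alt_box _ _ hbox]
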